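-- pv_equiv track=rewrite | github.com/naserjawas/signpy | train.py | construct_segment
-- ===== SOURCE A (Python) =====
-- def construct_segment(listgtdata):
--     frmsegment = []
--     last = 0
--     for i, g in enumerate(listgtdata):
--         if i == 0:
--             frmsegment.append(0)
--             last = g
--         else:
--             if ((g not in [last, last+1, last+2]) or
--                 (g == last and  listgtdata[i-1] == last+2)):
--                 frmsegment[-1] = 1
--                 frmsegment.append(1)
--                 last = g
--             else:
--                 frmsegment.append(0)
--
--     return frmsegment
-- ===== SOURCE B (Python) =====
-- def construct_segment(listgtdata):
--     # Two-phase decomposition: (1) one zip pass detecting boundary flags,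
--     # (2) mark each position if it or its successor is a boundary.
--     if not listgtdata:
--         return []
--     flags = []
--     last = listgtdata[0]
--     for prev, g in zip(listgtdata, listgtdata[1:]):
--         b = g not in (last, last + 1, last + 2) or (g == last and prev == last + 2)
--         flags.append(b)
--         if b:
--             last = g
--     return [1 if (f1 or f2) else 0
--             for f1, f2 in zip([False] + flags, flags + [False])]
-- ===== Notes on version B (the rewrite author's own statement) =====
-- stated objective: alternative
-- what changed: Replaces A's fused loop with in-place back-patching of the previous element by a two-phase decomposition: one zip pass over adjacent pairs collecting boundary flags, then a second pass marking position j iff flag j or flag j+1 holds.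
import Mathlib
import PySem

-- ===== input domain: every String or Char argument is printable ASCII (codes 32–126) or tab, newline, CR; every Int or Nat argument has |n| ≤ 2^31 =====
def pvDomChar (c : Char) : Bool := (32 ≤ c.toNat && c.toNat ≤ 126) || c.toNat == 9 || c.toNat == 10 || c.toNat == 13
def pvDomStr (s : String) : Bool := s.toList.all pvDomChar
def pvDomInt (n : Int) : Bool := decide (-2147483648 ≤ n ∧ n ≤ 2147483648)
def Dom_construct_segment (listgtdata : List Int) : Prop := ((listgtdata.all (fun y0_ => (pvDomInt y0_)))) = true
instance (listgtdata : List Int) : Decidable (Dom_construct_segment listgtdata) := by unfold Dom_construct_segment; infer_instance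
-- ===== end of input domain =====

-- B replaces A's fused append/back-patch loop by a detect-flags-then-mark two-phase pass (alternative decomposition, same complexity).

-- ===== PORT A =====
-- frmsegment[-1] = 1  (unreachable on an empty list, since it only runs for i > 0)
def pySetLast (xs : List Int) (v : Int) : List Int :=
  match xs with
  | [] => []
  | [_] => [v]
  | x :: y :: ys => x :: pySetLast (y :: ys) v

def csStepA (listgtdata : List Int) (st : List Int × Int) (p : Int × Int) : List Int × Int :=
  let frmsegment := st.1
  let last := st.2
  let i := p.1
  let g := p.2
  if i = 0 then
    (frmsegment ++ [0], g)
  else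
    if (¬ (g = last ∨ g = last + 1 ∨ g = last + 2)) ∨
       (g = last ∧ PySem.List.pyGet? listgtdata (i - 1) = some (last + 2)) then
      (pySetLast frmsegment 1 ++ [1], g)
    else
      (frmsegment ++ [0], last)

def construct_segment (listgtdata : List Int) : List Int :=
  ((PySem.List.enumerate listgtdata 0).foldl (csStepA listgtdata) ([], 0)).1

-- ===== PORT B =====
def csCond (last prev g : Int) : Bool :=
  (!(g == last || g == last + 1 || g == last + 2)) || (g == last && prev == last + 2)

-- second pass: mark position j iff flag j or flag j+1 (zip of shifted flag lists)
def csMark (flags : List Bool) : List Int :=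
  ((false :: flags).zip (flags ++ [false])).map
    (fun q => if q.1 || q.2 then (1 : Int) else 0)

def csStepB (st : List Bool × Int) (p : Int × Int) : List Bool × Int :=
  let b := csCond st.2 p.1 p.2
  (st.1 ++ [b], if b then p.2 else st.2)

def construct_segment_alt (listgtdata : List Int) : List Int :=
  match listgtdata with
  | [] => []
  | g0 :: rest =>
    csMark (((listgtdata.zip rest).foldl csStepB ([], g0)).1)

-- ===== PRECONDITION & SPEC =====
def Spec_construct_segment (listgtdata : List Int) (out : List Int) : Prop := out = construct_segment_alt listgtdata
instance (listgtdata : List Int) (out : List Int) : Decidable (Spec_construct_segment listgtdata out) := by unfold Spec_construct_segment; infer_instance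

-- ===== CLAIM (what is proved, stated in full; the proofs are below) =====
def Claim_equal_construct_segment : Prop := ∀ (listgtdata : List Int), Dom_construct_segment listgtdata → Spec_construct_segment listgtdata (construct_segment listgtdata)

-- ===== LEMMAS AND PROOFS =====

-- flags of the suffix, driven by the (prev, g) pair list
def csFlags : Int → List (Int × Int) → List Bool
  | _, [] => []
  | last, (prev, g) :: ps =>
    let b := csCond last prev g
    b :: csFlags (if b then g else last) ps

-- outputs from a position whose own flag is b, followed by flags bs
def csOuts : Bool → List Bool → List Int
  | b, [] => [if b then 1 else 0]
  | b, b' :: bs => (if b || b' then 1 else 0) :: csOuts b' bs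

theorem pySetLast_append (frm0 : List Int) (x v : Int) :
    pySetLast (frm0 ++ [x]) v = frm0 ++ [v] := by
  induction frm0 with
  | nil => rfl
  | cons a l ih =>
    cases l with
    | nil => simp [pySetLast]
    | cons b l' => simpa [pySetLast] using ih

theorem csLoopB (ps : List (Int × Int)) :
    ∀ (acc : List Bool) (last : Int),
      (ps.foldl csStepB (acc, last)).1 = acc ++ csFlags last ps := by
  induction ps with
  | nil => simp [csFlags]
  | cons p ps ih =>
    intro acc last
    obtain ⟨prev, g⟩ := p
    simp only [List.foldl_cons, csStepB, csFlags]
    rw [ih]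
    simp

theorem csOuts_zip (bs : List Bool) :
    ∀ (b : Bool),
      ((b :: bs).zip (bs ++ [false])).map (fun q => if q.1 || q.2 then (1 : Int) else 0)
        = csOuts b bs := by
  induction bs with
  | nil => intro b; simp [csOuts]
  | cons b' bs ih =>
    intro b
    simp only [List.cons_append, List.zip_cons_cons, List.map_cons, csOuts]
    rw [ih]

theorem csLoopA (l : List Int) (gs : List Int) :
    ∀ (k : Nat) (prev : Int), l[k]? = some prev → l.drop (k + 1) = gs →
    ∀ (frm0 : List Int) (b : Bool) (last : Int),
      ((PySem.List.enumerate gs ((k : Int) + 1)).foldl (csStepA l)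
          (frm0 ++ [if b then 1 else 0], last)).1
      = frm0 ++ csOuts b (csFlags last ((prev :: gs).zip gs)) := by
  induction gs with
  | nil => intro k prev _ _ frm0 b last; simp [PySem.List.enumerate, csOuts, csFlags]
  | cons g gs ih =>
    intro k prev hk hdrop frm0 b last
    have hkg : l[k + 1]? = some g := by
      have h1 : (l.drop (k + 1))[0]? = l[k + 1 + 0]? := List.getElem?_drop
      rw [hdrop] at h1
      simpa using h1.symm
    have hdrop' : l.drop (k + 1 + 1) = gs := by
      have h1 : List.drop 1 (List.drop (k + 1) l) = gs := by rw [hdrop]; rfl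
      rwa [List.drop_drop] at h1
    rw [PySem.List.enumerate_cons, List.foldl_cons]
    have hi0 : ¬ ((k : Int) + 1 = 0) := by omega
    have hget : PySem.List.pyGet? l ((k : Int) + 1 - 1) = some prev := by
      have : (k : Int) + 1 - 1 = (k : Int) := by omega
      rw [this, PySem.List.pyGet?_natCast, hk]
    have hiff : ((¬ (g = last ∨ g = last + 1 ∨ g = last + 2)) ∨
        (g = last ∧ PySem.List.pyGet? l ((k : Int) + 1 - 1) = some (last + 2)))
        ↔ csCond last prev g = true := by
      rw [hget]
      simp only [csCond, Bool.or_eq_true, Bool.not_eq_true', Bool.or_eq_false_iff,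
        Bool.and_eq_true, beq_iff_eq, beq_eq_false_iff_ne, ne_eq, Option.some.injEq]
      tauto
    by_cases hc : csCond last prev g = true
    · have hcProp := hiff.mpr hc
      have hstep : csStepA l (frm0 ++ [if b then 1 else 0], last) ((k : Int) + 1, g)
          = ((frm0 ++ [1]) ++ [if true then 1 else 0], g) := by
        simp only [csStepA, if_neg hi0, if_pos hcProp, pySetLast_append]
        simp
      rw [hstep]
      have h2 : ((k : Int) + 1) + 1 = ((k + 1 : Nat) : Int) + 1 := by push_cast; ring
      rw [h2, ih (k + 1) g hkg hdrop' (frm0 ++ [1]) true g]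
      simp [csFlags, csOuts, hc]
    · have hcProp : ¬ ((¬ (g = last ∨ g = last + 1 ∨ g = last + 2)) ∨
          (g = last ∧ PySem.List.pyGet? l ((k : Int) + 1 - 1) = some (last + 2))) :=
        fun h => hc (hiff.mp h)
      have hstep : csStepA l (frm0 ++ [if b then 1 else 0], last) ((k : Int) + 1, g)
          = ((frm0 ++ [if b then 1 else 0]) ++ [if false then 1 else 0], last) := by
        simp only [csStepA, if_neg hi0, if_neg hcProp]
        simp
      rw [hstep]
      have h2 : ((k : Int) + 1) + 1 = ((k + 1 : Nat) : Int) + 1 := by push_cast; ring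
      rw [h2, ih (k + 1) g hkg hdrop' (frm0 ++ [if b then 1 else 0]) false last]
      have hcf : csCond last prev g = false := Bool.eq_false_iff.mpr hc
      simp [csFlags, csOuts, hcf]

-- ===== VERDICT (by name: the statement is the Claim_ definition above) =====
theorem construct_segment_spec : Claim_equal_construct_segment := by
  intro l _
  unfold Spec_construct_segment
  match l with
  | [] => rfl
  | g0 :: rest =>
    have hA : construct_segment (g0 :: rest)
        = csOuts false (csFlags g0 ((g0 :: rest).zip rest)) := by
      unfold construct_segment
      rw [PySem.List.enumerate_cons]
      rw [List.foldl_cons]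
      have hstep0 : csStepA (g0 :: rest) ([], 0) ((0 : Int), g0)
          = ([] ++ [if false then 1 else 0], g0) := by
        simp [csStepA]
      rw [hstep0]
      have h0 : (0 : Int) + 1 = ((0 : Nat) : Int) + 1 := by norm_num
      rw [h0, csLoopA (g0 :: rest) rest 0 g0 (by simp) (by simp) [] false g0]
      simp
    have hB : construct_segment_alt (g0 :: rest)
        = csOuts false (csFlags g0 ((g0 :: rest).zip rest)) := by
      simp only [construct_segment_alt]
      rw [csLoopB, List.nil_append]
      unfold csMark
      rw [csOuts_zip]
    rw [hA, hB]
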